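-- pv_equiv track=rewrite | github.com/alicenoknow/ASD | xOthers/factorials.py | factorial_prime
-- ===== SOURCE A (Python) =====
-- def factorial_prime(n):
--     prime = [True] * (n + 1)
--     result = 1
--     for i in range(2, n + 1):
--         if prime[i]:
--             j = i + i
--             while j <= n:
--                 prime[j] = False
--                 j += i
--             sum = 0
--             t = i
--             while t <= n:
--                 sum += n // t
--                 t *= i
--             result *= i ** sum
--     return result
-- ===== SOURCE B (Python) =====
-- def factorial_prime(n):
--     result = 1
--     for i in range(2, n + 1):
--         result *= i
--     return result
-- ===== Notes on version B (the rewrite author's own statement) =====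
-- stated objective: simpler
-- what changed: B computes n! as a single running product over range(2, n+1) instead of A's sieve of Eratosthenes plus Legendre-formula prime-power accumulation.
import Mathlib
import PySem

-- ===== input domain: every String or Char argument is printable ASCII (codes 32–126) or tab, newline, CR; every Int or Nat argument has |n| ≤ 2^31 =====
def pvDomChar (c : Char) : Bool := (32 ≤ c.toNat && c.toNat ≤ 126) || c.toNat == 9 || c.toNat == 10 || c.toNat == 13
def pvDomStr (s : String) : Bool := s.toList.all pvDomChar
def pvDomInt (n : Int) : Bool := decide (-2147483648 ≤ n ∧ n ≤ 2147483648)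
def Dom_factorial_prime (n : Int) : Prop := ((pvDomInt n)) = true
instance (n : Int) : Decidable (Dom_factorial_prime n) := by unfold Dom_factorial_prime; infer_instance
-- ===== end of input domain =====

-- B replaces A's sieve + Legendre-formula prime-power product by a single running product over range(2, n+1); same return value for every int n.

-- ===== PORT A =====
-- inner 'while j <= n: prime[j] = False; j += i' (the '0 < i' conjunct is a totality guard only; every call has i ≥ 2)
def sieveMark (n i j : Int) (prime : List Bool) : List Bool :=
  if h : 0 < i ∧ j ≤ n then sieveMark n i (j + i) (prime.set j.toNat false) else prime
termination_by (n + 1 - j).toNat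
decreasing_by omega

-- inner 'while t <= n: sum += n // t; t *= i' (the '1 < i ∧ 0 < t' conjuncts are totality guards only; every call has i ≥ 2, t a power of i)
def legendreSum (n i t sum : Int) : Int :=
  if h : 1 < i ∧ 0 < t ∧ t ≤ n then legendreSum n i (t * i) (sum + PySem.Int.floordiv n t) else sum
termination_by (n + 1 - t).toNat
decreasing_by
  obtain ⟨hi, ht, htn⟩ := h
  have : t + t ≤ t * i := by nlinarith
  omega

-- body of A's 'for i in range(2, n + 1)' loop, acting on the state (prime, result)
def pvStep (n : Int) (st : List Bool × Int) (i : Int) : List Bool × Int :=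
  if PySem.List.pyGetD st.1 i false then
    (sieveMark n i (i + i) st.1, st.2 * i ^ (legendreSum n i i 0).toNat)
  else st

def factorial_prime (n : Int) : Int :=
  ((PySem.List.pyRange 2 (n+1) 1).foldl (pvStep n) (List.replicate (n+1).toNat true, 1)).2

-- ===== PORT B =====
def factorial_prime_alt (n : Int) : Int :=
  (PySem.List.pyRange 2 (n+1) 1).foldl (fun result i => result * i) 1

-- ===== PRECONDITION & SPEC =====
def Spec_factorial_prime (n : Int) (out : Int) : Prop := out = factorial_prime_alt n
instance (n : Int) (out : Int) : Decidable (Spec_factorial_prime n out) := by unfold Spec_factorial_prime; infer_instance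

-- ===== CLAIM (what is proved, stated in full; the proofs are below) =====
def Claim_equal_factorial_prime : Prop := ∀ (n : Int), Dom_factorial_prime n → Spec_factorial_prime n (factorial_prime n)

-- ===== LEMMAS AND PROOFS =====

-- 'k has been crossed out after the sieve has processed all values < i': some prime p < i has a proper multiple ≥ 2p equal to k
def pvMarked (i k : ℕ) : Bool := decide (∃ p < i, Nat.Prime p ∧ p ∣ k ∧ 2 * p ≤ k)

-- partial product of p ^ (Legendre exponent of p in N!) over the primes p < i
def pvProd (N i : ℕ) : ℕ := ∏ p ∈ (Finset.range i).filter Nat.Prime, p ^ (Nat.factorial N).factorization p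

-- loop invariant of A's main for-loop after processing range(2, i)
def pvInv (N i : ℕ) (st : List Bool × Int) : Prop :=
  st.1 = (List.range (N+1)).map (fun k => !pvMarked i k) ∧ st.2 = ((pvProd N i : ℕ) : ℤ)

theorem pv_set_map_range (m j : ℕ) (f : ℕ → Bool) :
    ((List.range m).map f).set j false
      = (List.range m).map (fun k => if k = j then false else f k) := by
  apply List.ext_getElem
  · simp
  · intro k h1 h2
    simp only [List.getElem_set, List.getElem_map, List.getElem_range]
    rcases eq_or_ne j k with h|h
    · simp [h]
    · simp [h, Ne.symm h]

theorem pv_sieveMark_eq (N i : ℕ) (hi : 0 < i) :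
    ∀ (fuel j0 : ℕ), i ∣ j0 → N + 1 - j0 ≤ fuel → ∀ (f : ℕ → Bool),
      sieveMark (N : ℤ) (i : ℤ) (j0 : ℤ) ((List.range (N+1)).map f)
        = (List.range (N+1)).map (fun k => if j0 ≤ k ∧ i ∣ k then false else f k) := by
  intro fuel
  induction fuel with
  | zero =>
    intro j0 hdvd hle f
    rw [sieveMark, dif_neg (by push_cast; omega)]
    apply List.map_congr_left
    intro k hk
    simp only [List.mem_range] at hk
    rw [if_neg (by omega)]
  | succ fuel ih =>
    intro j0 hdvd hle f
    by_cases hj : j0 ≤ N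
    · rw [sieveMark, dif_pos ⟨by exact_mod_cast hi, by exact_mod_cast hj⟩]
      have ht : ((j0 : ℤ)).toNat = j0 := Int.toNat_natCast j0
      have hadd : (j0 : ℤ) + (i : ℤ) = ((j0 + i : ℕ) : ℤ) := by push_cast; ring
      rw [ht, pv_set_map_range, hadd,
        ih (j0 + i) (Nat.dvd_add hdvd dvd_rfl) (by omega)]
      apply List.map_congr_left
      intro k hk
      simp only [List.mem_range] at hk
      by_cases hQ : j0 ≤ k ∧ i ∣ k
      · rw [if_pos hQ]
        by_cases hP2 : k = j0
        · rw [if_neg (by omega), if_pos hP2]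
        · have hstep : j0 + i ≤ k := by
            obtain ⟨d, rfl⟩ := hQ.2
            obtain ⟨c, rfl⟩ := hdvd
            have hcd : c ≤ d := Nat.le_of_mul_le_mul_left (by omega) hi
            have hcd2 : c ≠ d := fun he => hP2 (by rw [he])
            calc i * c + i = i * (c + 1) := by ring
              _ ≤ i * d := Nat.mul_le_mul_left i (by omega)
          rw [if_pos ⟨hstep, hQ.2⟩]
      · have h1 : ¬(j0 + i ≤ k ∧ i ∣ k) := fun ⟨a, b⟩ => hQ ⟨by omega, b⟩
        have h2 : k ≠ j0 := fun he => hQ ⟨by omega, he ▸ hdvd⟩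
        rw [if_neg h1, if_neg h2, if_neg hQ]
    · rw [sieveMark, dif_neg (by push_cast; omega)]
      apply List.map_congr_left
      intro k hk
      simp only [List.mem_range] at hk
      rw [if_neg (by omega)]

theorem pv_legendreSum_eq (N p : ℕ) (hN : 1 ≤ N) (hp : 2 ≤ p) :
    ∀ (fuel k : ℕ) (acc : ℤ), Nat.log p N + 1 - k ≤ fuel →
      legendreSum (N : ℤ) (p : ℤ) ((p ^ k : ℕ) : ℤ) acc
        = acc + ((∑ j ∈ Finset.Ico k (Nat.log p N + 1), N / p ^ j : ℕ) : ℤ) := by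
  intro fuel
  induction fuel with
  | zero =>
    intro k acc hle
    have hgt : N < p ^ k := Nat.lt_pow_of_log_lt (by omega) (by omega)
    rw [legendreSum, dif_neg (by
      rintro ⟨-, -, h3⟩
      have h4 : (p ^ k : ℕ) ≤ N := by exact_mod_cast h3
      omega)]
    rw [Finset.Ico_eq_empty (by omega)]
    simp
  | succ fuel ih =>
    intro k acc hle
    by_cases hk : p ^ k ≤ N
    · have hklog : k ≤ Nat.log p N := Nat.le_log_of_pow_le (by omega) hk
      rw [legendreSum, dif_pos ⟨by exact_mod_cast hp,
        by exact_mod_cast pow_pos (by omega : 0 < p) k, by exact_mod_cast hk⟩]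
      have hmul : ((p ^ k : ℕ) : ℤ) * (p : ℤ) = ((p ^ (k+1) : ℕ) : ℤ) := by
        push_cast [pow_succ]; ring
      rw [hmul, PySem.Int.floordiv_natCast, ih (k+1) _ (by omega)]
      conv_rhs => rw [Finset.sum_eq_sum_Ico_succ_bot
        (show k < Nat.log p N + 1 by omega) (fun j => N / p ^ j)]
      push_cast
      ring
    · have hlog : Nat.log p N < k := Nat.log_lt_of_lt_pow (by omega) (by omega)
      rw [legendreSum, dif_neg (by
        rintro ⟨-, -, h3⟩
        exact hk (by exact_mod_cast h3))]
      rw [Finset.Ico_eq_empty (by omega)]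
      simp

theorem pv_legendre_exponent (N p : ℕ) (hN : 1 ≤ N) (hp : p.Prime) :
    (legendreSum (N : ℤ) (p : ℤ) (p : ℤ) 0).toNat = (Nat.factorial N).factorization p := by
  have h2 : 2 ≤ p := hp.two_le
  have hsum := pv_legendreSum_eq N p hN h2 (Nat.log p N + 1) 1 0 (by omega)
  have hc : ((p ^ 1 : ℕ) : ℤ) = (p : ℤ) := by norm_num
  rw [hc] at hsum
  rw [hsum, zero_add, Int.toNat_natCast]
  haveI : Fact p.Prime := ⟨hp⟩
  rw [Nat.factorization_def _ hp, padicValNat_factorial (Nat.lt_succ_self _)]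

theorem pv_marked_self (i : ℕ) (h2 : 2 ≤ i) : pvMarked i i = !decide i.Prime := by
  by_cases hp : i.Prime
  · simp only [hp, decide_true, Bool.not_true, pvMarked, decide_eq_false_iff_not]
    rintro ⟨p, hlt, hpp, hdvd, -⟩
    rcases (Nat.Prime.eq_one_or_self_of_dvd hp p hdvd) with h | h
    · exact hpp.one_lt.ne' h
    · omega
  · simp only [hp, decide_false, Bool.not_false, pvMarked, decide_eq_true_eq]
    have hne1 : i ≠ 1 := by omega
    have hpf := Nat.minFac_prime hne1
    have hdvd := Nat.minFac_dvd i
    have hlt : i.minFac < i := by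
      rcases lt_or_eq_of_le (Nat.minFac_le (show 0 < i by omega)) with h | h
      · exact h
      · exact absurd (h ▸ hpf) hp
    have h2p : 2 * i.minFac ≤ i := by
      obtain ⟨c, hc⟩ := hdvd
      have hc0 : c ≠ 0 := by rintro rfl; omega
      have hc1 : c ≠ 1 := by rintro rfl; rw [mul_one] at hc; exact hp (by rw [hc]; exact hpf)
      calc 2 * i.minFac = i.minFac * 2 := by ring
        _ ≤ i.minFac * c := Nat.mul_le_mul_left _ (by omega)
        _ = i := hc.symm
    exact ⟨i.minFac, hlt, hpf, hdvd, h2p⟩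

theorem pv_marked_succ_of_not_prime (i : ℕ) (hp : ¬i.Prime) (k : ℕ) :
    pvMarked (i+1) k = pvMarked i k := by
  simp only [pvMarked]
  rw [decide_eq_decide]
  constructor
  · rintro ⟨p, hlt, hpp, rest⟩
    rcases Nat.lt_succ_iff_lt_or_eq.mp hlt with h | rfl
    · exact ⟨p, h, hpp, rest⟩
    · exact absurd hpp hp
  · rintro ⟨p, hlt, rest⟩
    exact ⟨p, by omega, rest⟩

theorem pv_fold_inv (N : ℕ) (hN : 2 ≤ N) :
    ∀ i, 2 ≤ i → i ≤ N + 1 →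
      pvInv N i ((PySem.List.pyRange 2 (i : ℤ) 1).foldl (pvStep (N : ℤ))
        (List.replicate (N+1) true, 1)) := by
  intro i h2
  induction i, h2 using Nat.le_induction with
  | base =>
    intro _
    rw [show ((2 : ℕ) : ℤ) = 2 by norm_num, PySem.List.pyRange_one_eq_nil (le_refl 2),
      List.foldl_nil]
    constructor
    · have hmk : ∀ k ∈ List.range (N+1), (fun _ => true) k = (fun k => !pvMarked 2 k) k := by
        intro k _
        have : pvMarked 2 k = false := by
          simp only [pvMarked, decide_eq_false_iff_not]
          rintro ⟨p, hlt, hpp, -⟩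
          have := hpp.two_le
          omega
        simp [this]
      show List.replicate (N+1) true = _
      rw [← List.map_congr_left hmk]
      simp [List.map_const']
    · show (1 : ℤ) = _
      have hf : (Finset.range 2).filter Nat.Prime = ∅ := by decide
      simp [pvProd, hf]
  | succ i hi ih =>
    intro hle
    have hIH := ih (by omega)
    obtain ⟨hL, hR⟩ := hIH
    have hsplit : PySem.List.pyRange 2 ((i+1 : ℕ) : ℤ) 1
        = PySem.List.pyRange 2 (i : ℤ) 1 ++ [(i : ℤ)] := by
      rw [show ((i+1 : ℕ) : ℤ) = (i : ℤ) + 1 by push_cast; ring]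
      exact PySem.List.pyRange_one_succ_right (by exact_mod_cast hi)
    rw [hsplit, List.foldl_append, List.foldl_cons, List.foldl_nil]
    set st := (PySem.List.pyRange 2 (i : ℤ) 1).foldl (pvStep (N : ℤ))
      (List.replicate (N+1) true, 1) with hst
    rw [pvStep]
    have hget : PySem.List.pyGetD st.1 (i : ℤ) false = decide i.Prime := by
      rw [hL, PySem.List.pyGetD_eq_getElem _ _ (by positivity)
        (by simp; omega)]
      simp only [Int.toNat_natCast, List.getElem_map, List.getElem_range]
      rw [pv_marked_self i hi, Bool.not_not]
    by_cases hp : i.Prime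
    · rw [hget]
      simp only [hp, decide_true, if_true]
      constructor
      · show sieveMark (N : ℤ) (i : ℤ) ((i : ℤ) + (i : ℤ)) st.1 = _
        rw [hL, show ((i : ℤ) + (i : ℤ)) = ((2*i : ℕ) : ℤ) by push_cast; ring,
          pv_sieveMark_eq N i (by omega) (N+1) (2*i) ⟨2, by ring⟩ (by omega)]
        apply List.map_congr_left
        intro k hk
        simp only [List.mem_range] at hk
        by_cases hc : 2*i ≤ k ∧ i ∣ k
        · rw [if_pos hc]
          have : pvMarked (i+1) k = true :=
            decide_eq_true ⟨i, Nat.lt_succ_self i, hp, hc.2, by omega⟩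
          rw [this]
          rfl
        · rw [if_neg hc]
          have heq : pvMarked i k = pvMarked (i+1) k := by
            simp only [pvMarked]
            rw [decide_eq_decide]
            constructor
            · rintro ⟨p, hlt, rest⟩
              exact ⟨p, by omega, rest⟩
            · rintro ⟨p, hlt, hpp, hd, h2p⟩
              rcases Nat.lt_succ_iff_lt_or_eq.mp hlt with h | rfl
              · exact ⟨p, h, hpp, hd, h2p⟩
              · exact absurd ⟨by omega, hd⟩ hc
          rw [heq]
      · show st.2 * (i : ℤ) ^ (legendreSum (N : ℤ) (i : ℤ) (i : ℤ) 0).toNat = _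
        rw [hR, pv_legendre_exponent N i (by omega) hp]
        have hnot : i ∉ (Finset.range i).filter Nat.Prime := by simp
        simp only [pvProd, Finset.range_add_one, Finset.filter_insert, if_pos hp,
          Finset.prod_insert hnot]
        push_cast
        ring
    · rw [hget]
      simp only [hp, decide_false, Bool.false_eq_true, if_false]
      constructor
      · rw [hL]
        apply List.map_congr_left
        intro k _
        rw [pv_marked_succ_of_not_prime i hp k]
      · rw [hR]
        simp only [pvProd, Finset.range_add_one, Finset.filter_insert, if_neg hp]

theorem pv_prod_final (N : ℕ) (hN : 2 ≤ N) : pvProd N (N+1) = Nat.factorial N := by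
  have hne : Nat.factorial N ≠ 0 := Nat.factorial_ne_zero N
  have hsub : (Nat.factorial N).factorization.support ⊆ (Finset.range (N+1)).filter Nat.Prime := by
    intro p hp
    rw [Nat.support_factorization, Nat.mem_primeFactors] at hp
    obtain ⟨hpp, hdvd, -⟩ := hp
    simp only [Finset.mem_filter, Finset.mem_range]
    have := (Nat.Prime.dvd_factorial hpp).mp hdvd
    exact ⟨by omega, hpp⟩
  calc pvProd N (N+1)
      = (Nat.factorial N).factorization.prod (fun p e => p ^ e) :=
        (Finsupp.prod_of_support_subset _ hsub _ (fun p _ => pow_zero p)).symm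
    _ = Nat.factorial N := Nat.factorization_prod_pow_eq_self hne

theorem pv_alt_eq (N : ℕ) : factorial_prime_alt (N : ℤ) = ((Nat.factorial N : ℕ) : ℤ) := by
  induction N with
  | zero =>
    rw [factorial_prime_alt, PySem.List.pyRange_one_eq_nil (by norm_num), List.foldl_nil]
    rfl
  | succ n ih =>
    rcases Nat.eq_zero_or_pos n with rfl | hn
    · rw [factorial_prime_alt, PySem.List.pyRange_one_eq_nil (by norm_num), List.foldl_nil]
      rfl
    · rw [factorial_prime_alt,
        show ((n+1 : ℕ) : ℤ) + 1 = ((n : ℤ) + 1) + 1 by push_cast; ring,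
        PySem.List.pyRange_one_succ_right (by omega : (2:ℤ) ≤ (n : ℤ) + 1),
        List.foldl_append, List.foldl_cons, List.foldl_nil]
      rw [factorial_prime_alt] at ih
      rw [ih]
      push_cast [Nat.factorial_succ]
      ring

-- ===== VERDICT (by name: the statement is the Claim_ definition above) =====
theorem factorial_prime_spec : Claim_equal_factorial_prime := by
  intro n _
  unfold Spec_factorial_prime
  by_cases hn : n < 2
  · have h1 : PySem.List.pyRange 2 (n+1) 1 = [] := PySem.List.pyRange_one_eq_nil (by omega)
    simp [factorial_prime, factorial_prime_alt, h1]
  · push_neg at hn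
    obtain ⟨N, rfl⟩ : ∃ N : ℕ, n = (N : ℤ) := ⟨n.toNat, (Int.toNat_of_nonneg (by omega)).symm⟩
    have hN : 2 ≤ N := by exact_mod_cast hn
    have hinv := pv_fold_inv N hN (N+1) (by omega) (by omega)
    have hcast : ((N : ℤ) + 1) = ((N + 1 : ℕ) : ℤ) := by push_cast; ring
    have : factorial_prime (N : ℤ)
        = ((PySem.List.pyRange 2 ((N+1 : ℕ) : ℤ) 1).foldl (pvStep (N : ℤ))
            (List.replicate (N+1) true, 1)).2 := by
      rw [factorial_prime, hcast]
      norm_num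
    rw [this, hinv.2, pv_prod_final N hN, pv_alt_eq N]
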